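-- pv_equiv track=rewrite | github.com/GedeOke/STRAVA-RAG-CHATBOT | backend/app/services/rag/answerer.py | _join_context
-- ===== SOURCE A (Python) =====
-- from typing import List, Optional, Tuple, Dict, Any
--
-- def _join_context(ctxs: List[str], max_chars: int = 6000) -> str:
--     """
--     Gabungkan konteks, batasi panjang supaya aman untuk LLM.
--     """
--     if not ctxs:
--         return ""
--     joined, total = [], 0
--     for i, c in enumerate(ctxs, start=1):
--         line = f"[{i}] {c}"
--         if total + len(line) > max_chars:
--             break
--         joined.append(line)
--         total += len(line)
--     return "\n".join(joined)
-- ===== SOURCE B (Python) =====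
-- def _join_context(ctxs, max_chars=6000):
--     lines = [f"[{i}] {c}" for i, c in enumerate(ctxs, 1)]
--     cums, t = [], 0
--     for l in lines:
--         t += len(l)
--         cums.append(t)
--     k = next((j for j, c in enumerate(cums) if c > max_chars), len(lines))
--     return "\n".join(lines[:k])
-- ===== Notes on version B (the rewrite author's own statement) =====
-- stated objective: alternative
-- what changed: B works in separate phases - it formats every line up front, builds a prefix-sum list of line lengths, locates the first cumulative overflow index, and joins a slice of the lines - instead of A's single loop that appends while accumulating and breaks early.
import Mathlib
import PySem

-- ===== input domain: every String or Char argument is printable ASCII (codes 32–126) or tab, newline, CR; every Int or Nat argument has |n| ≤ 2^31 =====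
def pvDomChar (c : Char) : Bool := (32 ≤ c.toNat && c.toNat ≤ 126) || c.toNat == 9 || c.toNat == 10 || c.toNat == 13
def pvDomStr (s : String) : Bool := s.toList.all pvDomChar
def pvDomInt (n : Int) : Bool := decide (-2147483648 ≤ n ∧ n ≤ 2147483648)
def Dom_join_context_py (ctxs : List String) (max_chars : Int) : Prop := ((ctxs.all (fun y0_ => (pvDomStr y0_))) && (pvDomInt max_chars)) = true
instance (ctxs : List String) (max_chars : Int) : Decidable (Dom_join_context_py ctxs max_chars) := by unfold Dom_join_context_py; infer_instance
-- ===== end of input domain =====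

-- B replaces A's accumulate-and-break loop by phases (format all lines, prefix sums, first overflow index, slice+join); same value, alternative decomposition.


-- ===== PORT A =====
-- A's loop: enumerate from 1, format the line, break when the running total would exceed max_chars.
def joinContextGoA (max_chars : Int) : List String → Int → Int → List String
  | [], _, _ => []
  | c :: rest, i, total =>
    let line := "[" ++ PySem.Int.toStr i ++ "] " ++ c
    if total + PySem.Str.len line > max_chars then []
    else line :: joinContextGoA max_chars rest (i + 1) (total + PySem.Str.len line)

def join_context_py (ctxs : List String) (max_chars : Int) : String :=
  if ctxs.isEmpty then ""
  else PySem.Str.join "\n" (joinContextGoA max_chars ctxs 1 0)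

-- ===== PORT B =====
def join_context_py_alt (ctxs : List String) (max_chars : Int) : String :=
  let lines := (PySem.List.enumerate ctxs 1).map (fun p => "[" ++ PySem.Int.toStr p.1 ++ "] " ++ p.2)
  let st := lines.foldl (fun (st : List Int × Int) l =>
      (st.1 ++ [st.2 + PySem.Str.len l], st.2 + PySem.Str.len l)) ([], 0)
  let cums := st.1
  let k := (List.findIdx? (fun c => decide (c > max_chars)) cums).getD lines.length
  PySem.Str.join "\n" (lines.take k)

-- ===== PRECONDITION & SPEC =====
def Spec_join_context_py (ctxs : List String) (max_chars : Int) (out : String) : Prop := out = join_context_py_alt ctxs max_chars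
instance (ctxs : List String) (max_chars : Int) (out : String) : Decidable (Spec_join_context_py ctxs max_chars out) := by unfold Spec_join_context_py; infer_instance

-- ===== CLAIM (what is proved, stated in full; the proofs are below) =====
def Claim_equal_join_context_py : Prop := ∀ (ctxs : List String) (max_chars : Int), Dom_join_context_py ctxs max_chars → Spec_join_context_py ctxs max_chars (join_context_py ctxs max_chars)

-- ===== LEMMAS AND PROOFS =====

-- cut: the greedy prefix of a line list under a running total (what A's loop computes on the lines)
def joinCut (mc : Int) : Int → List String → List String
  | _, [] => []
  | t, l :: ls => if t + PySem.Str.len l > mc then [] else l :: joinCut mc (t + PySem.Str.len l) ls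

-- cumulative sums of the line lengths starting from t
def joinCums : Int → List String → List Int
  | _, [] => []
  | t, l :: ls => (t + PySem.Str.len l) :: joinCums (t + PySem.Str.len l) ls

theorem goA_eq_cut (mc : Int) (ctxs : List String) (i t : Int) :
    joinContextGoA mc ctxs i t
      = joinCut mc t ((PySem.List.enumerate ctxs i).map (fun p => "[" ++ PySem.Int.toStr p.1 ++ "] " ++ p.2)) := by
  induction ctxs generalizing i t with
  | nil => simp [joinContextGoA, PySem.List.enumerate_nil, joinCut]
  | cons c rest ih =>
    simp only [joinContextGoA, PySem.List.enumerate_cons, List.map_cons, joinCut]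
    split_ifs with h
    · rfl
    · rw [ih]

theorem foldl_eq_cums (acc : List Int) (t : Int) (ls : List String) :
    (ls.foldl (fun (st : List Int × Int) l =>
        (st.1 ++ [st.2 + PySem.Str.len l], st.2 + PySem.Str.len l)) (acc, t)).1
      = acc ++ joinCums t ls := by
  induction ls generalizing acc t with
  | nil => simp [joinCums]
  | cons l ls ih => rw [List.foldl_cons, ih]; simp [joinCums]

theorem cut_eq_take (mc : Int) (t : Int) (ls : List String) :
    joinCut mc t ls
      = ls.take ((List.findIdx? (fun c => decide (c > mc)) (joinCums t ls)).getD ls.length) := by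
  induction ls generalizing t with
  | nil => simp [joinCut, joinCums]
  | cons l ls ih =>
    by_cases h : t + PySem.Str.len l > mc
    · have h' : mc < t + (l.length : Int) := by simpa [PySem.Str.len_eq] using h
      simp [joinCut, joinCums, List.findIdx?_cons, h']
    · have hd : (decide (t + PySem.Str.len l > mc)) = false := by simpa using h
      simp only [joinCut, joinCums, List.findIdx?_cons, hd, if_neg h, Bool.false_eq_true,
        if_false]
      rw [ih (t + PySem.Str.len l)]
      cases hfi : List.findIdx? (fun c => decide (c > mc)) (joinCums (t + PySem.Str.len l) ls) with
      | none => simp [List.length_cons]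
      | some n => simp

theorem join_nil_str : PySem.Str.join "\n" ([] : List String) = "" := by
  simp [PySem.Str.join, PySem.Chars.join, List.intercalate]

-- ===== VERDICT (by name: the statement is the Claim_ definition above) =====
theorem join_context_py_spec : Claim_equal_join_context_py := by
  intro ctxs max_chars _
  show join_context_py ctxs max_chars = join_context_py_alt ctxs max_chars
  have halt : join_context_py_alt ctxs max_chars
      = PySem.Str.join "\n"
          (((PySem.List.enumerate ctxs 1).map (fun p => "[" ++ PySem.Int.toStr p.1 ++ "] " ++ p.2)).take
            ((List.findIdx? (fun c => decide (c > max_chars))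
                ((((PySem.List.enumerate ctxs 1).map (fun p => "[" ++ PySem.Int.toStr p.1 ++ "] " ++ p.2)).foldl
                    (fun (st : List Int × Int) l =>
                      (st.1 ++ [st.2 + PySem.Str.len l], st.2 + PySem.Str.len l)) ([], 0)).1)).getD
              ((PySem.List.enumerate ctxs 1).map (fun p => "[" ++ PySem.Int.toStr p.1 ++ "] " ++ p.2)).length)) := rfl
  rw [halt, foldl_eq_cums]
  simp only [List.nil_append]
  rw [← cut_eq_take, ← goA_eq_cut]
  cases ctxs with
  | nil => simp [join_context_py, joinContextGoA, join_nil_str]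
  | cons c rest => rfl
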